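-- pv_equiv track=rewrite | github.com/GStream2025/skyline-style | app/services/email_service.py | _normalize_email_list
-- ===== SOURCE A (Python) =====
-- from typing import Iterable, Optional, Sequence, List, Tuple, Union
--
-- def _normalize_email_list(x: Union[str, Sequence[str], None]) -> List[str]:
--     if not x:
--         return []
--     if isinstance(x, str):
--         parts = [p.strip() for p in x.split(",")]
--         return [p for p in parts if p]
--     out: List[str] = []
--     for v in x:
--         if v:
--             out.append(str(v).strip())
--     return [p for p in out if p]
-- ===== SOURCE B (Python) =====
-- def _normalize_email_list(x):
--     if not x:
--         return []
--     if isinstance(x, str):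
--         # single character-level scan: build tokens directly, stripping as we go
--         out = []
--         cur = []    # current token, leading whitespace never enters, trailing held in pend
--         pend = []   # run of whitespace seen since the last non-whitespace char of cur
--         for ch in x:
--             if ch == ",":
--                 if cur:
--                     out.append("".join(cur))
--                 cur = []
--                 pend = []
--             elif ch.isspace():
--                 if cur:
--                     pend.append(ch)
--             else:
--                 cur += pend
--                 pend = []
--                 cur.append(ch)
--         if cur:
--             out.append("".join(cur))
--         return out
--     out = []
--     for v in x:
--         if v:
--             s = str(v).strip()
--             if s:
--                 out.append(s)
--     return out
-- ===== Notes on version B (the rewrite author's own statement) =====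
-- stated objective: alternative
-- what changed: Replaces A's three-stage pipeline (split on commas, strip every part, filter out empties) with a single character-level state-machine scan that never materialises the raw parts: it builds each cleaned token directly, dropping leading whitespace and holding a pending whitespace run that is committed only when more non-whitespace arrives.
import Mathlib
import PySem

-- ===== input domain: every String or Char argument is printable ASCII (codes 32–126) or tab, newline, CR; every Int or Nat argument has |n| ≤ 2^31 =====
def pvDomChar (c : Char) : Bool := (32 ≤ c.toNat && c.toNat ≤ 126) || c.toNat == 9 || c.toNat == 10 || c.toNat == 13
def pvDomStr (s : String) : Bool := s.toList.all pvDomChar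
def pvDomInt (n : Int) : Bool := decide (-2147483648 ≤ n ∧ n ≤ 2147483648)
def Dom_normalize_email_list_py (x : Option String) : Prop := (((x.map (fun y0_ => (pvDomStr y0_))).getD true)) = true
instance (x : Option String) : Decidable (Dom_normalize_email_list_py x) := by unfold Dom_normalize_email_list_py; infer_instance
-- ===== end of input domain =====

-- B replaces A's split-then-strip-then-filter pipeline with a single character-level scan
-- that builds the cleaned tokens directly (objective: alternative; same O(n) cost).
-- Only the str/None cases of A's Union argument are portable here (Option String); the
-- Sequence branch is outside the stated type.

-- ===== PORT A =====
-- A: if not x: []; parts = [p.strip() for p in x.split(",")]; [p for p in parts if p]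
def normalize_email_list_py (x : Option String) : List String :=
  match x with
  | none => []
  | some s =>
    if s = "" then []
    else
      let parts := ((PySem.Str.split? s ",").getD []).map (fun p => PySem.Str.strip p)
      parts.filter (fun p => p ≠ "")

-- ===== PORT B =====
-- B's loop body: on ',' flush the current token; on whitespace hold it in pend (dropped if
-- trailing); otherwise commit pend and the char to cur.  State = (out, cur, pend).
def pvStepB (st : List String × List Char × List Char) (ch : Char) :
    List String × List Char × List Char :=
  match st with
  | (out, cur, pend) =>
    if ch = ',' then
      ((if cur ≠ [] then out ++ [String.ofList cur] else out), [], [])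
    else if PySem.Chars.isspace ch then
      (out, cur, if cur ≠ [] then pend ++ [ch] else pend)
    else
      (out, cur ++ pend ++ [ch], [])

-- B: if not x: []; then one fold over the characters, with a final flush of cur
-- ("".join(cur) on a list of chars is String.ofList cur — exact).
def normalize_email_list_py_alt (x : Option String) : List String :=
  match x with
  | none => []
  | some s =>
    if s = "" then []
    else
      let st := s.toList.foldl pvStepB ([], [], [])
      if st.2.1 ≠ [] then st.1 ++ [String.ofList st.2.1] else st.1

-- ===== PRECONDITION & SPEC =====
def Spec_normalize_email_list_py (x : Option String) (out : List String) : Prop := out = normalize_email_list_py_alt x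
instance (x : Option String) (out : List String) : Decidable (Spec_normalize_email_list_py x out) := by unfold Spec_normalize_email_list_py; infer_instance

-- ===== CLAIM (what is proved, stated in full; the proofs are below) =====
def Claim_equal_normalize_email_list_py : Prop := ∀ (x : Option String), Dom_normalize_email_list_py x → Spec_normalize_email_list_py x (normalize_email_list_py x)

-- ===== LEMMAS AND PROOFS =====

-- structural form of splitting on a single comma (proof-side spec of A's x.split(","))
def pvSplitC : List Char → List (List Char)
  | [] => [[]]
  | c :: rest =>
    if c = ',' then [] :: pvSplitC rest
    else
      match pvSplitC rest with
      | [] => [[c]]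
      | t :: ts => (c :: t) :: ts

theorem pvSplitC_ne_nil (l : List Char) : pvSplitC l ≠ [] := by
  cases l with
  | nil => simp [pvSplitC]
  | cons c rest =>
    simp only [pvSplitC]
    split_ifs
    · simp
    · cases h : pvSplitC rest <;> simp

theorem pv_go_eq (l : List Char) : ∀ (fuel : Nat) (cur : List Char) (acc : List (List Char)),
    l.length < fuel →
    PySem.Chars.splitOn.go [','] fuel l cur acc
      = acc.reverse ++ ((cur.reverse ++ (pvSplitC l).headI) :: (pvSplitC l).tail) := by
  induction l with
  | nil =>
    intro fuel cur acc h
    match fuel with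
    | fuel + 1 => simp [PySem.Chars.splitOn.go, pvSplitC]
  | cons c rest ih =>
    intro fuel cur acc h
    match fuel with
    | fuel + 1 =>
      simp only [PySem.Chars.splitOn.go]
      by_cases hc : c = ','
      · have hp : [','].isPrefixOf (c :: rest) = true := by simp [hc, List.isPrefixOf]
        rw [if_pos hp]
        simp only [List.length_singleton, List.drop_one, List.tail_cons]
        rw [ih fuel [] (cur.reverse :: acc) (by simpa using Nat.lt_of_succ_lt_succ h)]
        rcases hsp : pvSplitC rest with _ | ⟨t, ts⟩
        · exact absurd hsp (pvSplitC_ne_nil rest)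
        · simp [pvSplitC, hc, hsp]
      · have hp : [','].isPrefixOf (c :: rest) = false := by
          have hbe : (',' == c) = false := beq_eq_false_iff_ne.mpr (fun h => hc h.symm)
          simp [List.isPrefixOf, hbe]
        rw [if_neg (by simp [hp])]
        rw [ih fuel (c :: cur) acc (by simpa using Nat.lt_of_succ_lt_succ h)]
        rcases hsp : pvSplitC rest with _ | ⟨t, ts⟩
        · exact absurd hsp (pvSplitC_ne_nil rest)
        · simp [pvSplitC, hc, hsp]

theorem pv_splitOn_eq (l : List Char) :
    PySem.Chars.splitOn l [','] = pvSplitC l := by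
  unfold PySem.Chars.splitOn
  rw [pv_go_eq l (l.length + 1) [] [] (Nat.lt_succ_self _)]
  rcases hsp : pvSplitC l with _ | ⟨t, ts⟩
  · exact absurd hsp (pvSplitC_ne_nil l)
  · simp

theorem pv_strip_ofList (t : List Char) :
    PySem.Str.strip (String.ofList t) = String.ofList (PySem.Chars.strip t) := by
  apply String.ext
  simp [PySem.Str.toList_strip]

-- A's value, stated on the character level
theorem pv_A_char (s : String) (hs : s ≠ "") :
    normalize_email_list_py (some s)
      = (((pvSplitC s.toList).map PySem.Chars.strip).filter (· ≠ [])).map String.ofList := by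
  have hsplit : PySem.Str.split? s "," = some ((pvSplitC s.toList).map String.ofList) := by
    unfold PySem.Str.split?
    simp [PySem.Chars.split?, pv_splitOn_eq]
  simp only [normalize_email_list_py, hsplit, Option.getD_some, List.map_map]
  rw [if_neg hs]
  have hfun : (fun p => PySem.Str.strip p) ∘ String.ofList
      = String.ofList ∘ PySem.Chars.strip := by
    funext t; simp [pv_strip_ofList]
  rw [hfun, ← List.map_map, List.filter_map]
  conv_rhs => rw [List.filter_map]
  congr 1
  rw [List.filter_map]
  congr 1
  apply List.filter_congr
  intro t _
  simp [Function.comp]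

-- rstrip distributes over an append whose left part ends in a non-space char
theorem pv_rstrip_append (a X : List Char) (ha : a ≠ [])
    (hlast : PySem.Chars.isspace (a.getLast ha) = false) :
    PySem.Chars.rstrip (a ++ X) = a ++ PySem.Chars.rstrip X := by
  unfold PySem.Chars.rstrip
  rw [List.reverse_append, List.dropWhile_append]
  by_cases hX : (X.reverse.dropWhile PySem.Chars.isspace).isEmpty
  · rw [if_pos hX]
    have hdw : a.reverse.dropWhile PySem.Chars.isspace = a.reverse := by
      cases hr : a.reverse with
      | nil => simp
      | cons b bs =>
        have hb : b = a.getLast ha := by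
          have h1 : a.getLast? = some b := by
            rw [List.getLast?_eq_head?_reverse, hr]; rfl
          have h2 : a.getLast? = some (a.getLast ha) := List.getLast?_eq_some_getLast ha
          rw [h1] at h2
          exact Option.some_inj.mp h2
        rw [List.dropWhile_cons_of_neg (by rw [hb, hlast]; simp)]
    rw [hdw]
    have : X.reverse.dropWhile PySem.Chars.isspace = [] := by simpa using hX
    simp [this]
  · rw [if_neg hX]
    simp

theorem pv_rstrip_all_space (p : List Char) (hp : p.all PySem.Chars.isspace = true) :
    PySem.Chars.rstrip p = [] := by
  unfold PySem.Chars.rstrip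
  have h : p.reverse.dropWhile PySem.Chars.isspace = [] := by
    apply List.dropWhile_eq_nil_iff.mpr
    intro c hc
    exact (List.all_eq_true.mp hp c (List.mem_reverse.mp hc))
  rw [h]; rfl

theorem pv_strip_cons_space (c : Char) (t : List Char) (hc : PySem.Chars.isspace c = true) :
    PySem.Chars.strip (c :: t) = PySem.Chars.strip t := by
  unfold PySem.Chars.strip PySem.Chars.lstrip
  rw [List.dropWhile_cons_of_pos hc]

theorem pv_strip_cons_nonspace (c : Char) (t : List Char) (hc : PySem.Chars.isspace c = false) :
    PySem.Chars.strip (c :: t) = c :: PySem.Chars.rstrip t := by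
  unfold PySem.Chars.strip PySem.Chars.lstrip
  rw [List.dropWhile_cons_of_neg (by rw [hc]; simp)]
  have := pv_rstrip_append [c] t (by simp) (by simpa using hc)
  simpa using this

-- the cleaned first token, given the scanner's mid-token state (cur, pend)
def pvTok (cur pend t : List Char) : List String :=
  let first := if cur = [] then PySem.Chars.strip t
               else cur ++ PySem.Chars.rstrip (pend ++ t)
  if first ≠ [] then [String.ofList first] else []

def pvFin (st : List String × List Char × List Char) : List String :=
  if st.2.1 ≠ [] then st.1 ++ [String.ofList st.2.1] else st.1

-- the B-side invariant: the fold from state (out, cur, pend) computes A's cleaned tokens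
theorem pv_strip_nil : PySem.Chars.strip [] = [] := rfl

-- the B-side invariant: the fold from state (out, cur, pend) computes A's cleaned tokens
theorem pv_B_main (l : List Char) : ∀ (out : List String) (cur pend : List Char),
    pend.all PySem.Chars.isspace = true →
    (cur = [] → pend = []) →
    (∀ h : cur ≠ [], PySem.Chars.isspace (cur.getLast h) = false) →
    pvFin (l.foldl pvStepB (out, cur, pend))
      = out ++ pvTok cur pend ((pvSplitC l).headI)
          ++ (((pvSplitC l).tail.map PySem.Chars.strip).filter (· ≠ [])).map String.ofList := by
  induction l with
  | nil =>
    intro out cur pend hpend hcp _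
    simp only [List.foldl_nil, pvFin, pvSplitC, List.headI, List.tail, pvTok]
    by_cases hc : cur = []
    · simp [hc, pv_strip_nil]
    · simp [hc, pv_rstrip_all_space pend hpend]
  | cons c rest ih =>
    intro out cur pend hpend hcp hlast
    rcases hsp : pvSplitC rest with _ | ⟨t, ts⟩
    · exact absurd hsp (pvSplitC_ne_nil rest)
    by_cases hc : c = ','
    · -- flush the token
      have hstep : pvStepB (out, cur, pend) c
          = ((if cur ≠ [] then out ++ [String.ofList cur] else out), [], []) := by
        simp [pvStepB, hc]
      have hsplit' : pvSplitC (c :: rest) = [] :: pvSplitC rest := by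
        simp [pvSplitC, hc]
      rw [List.foldl_cons, hstep,
        ih _ [] [] (by simp) (fun _ => rfl) (fun h => absurd rfl h), hsplit', hsp]
      simp only [List.headI, List.tail, List.map_cons, List.filter_cons]
      by_cases hcur : cur = [] <;> by_cases hst : PySem.Chars.strip t = [] <;>
        simp [pvTok, hcur, hst, pv_strip_nil, pv_rstrip_all_space pend hpend]
    · have hsplit' : pvSplitC (c :: rest) = (c :: t) :: ts := by
        simp [pvSplitC, hc, hsp]
      by_cases hsp_c : PySem.Chars.isspace c = true
      · -- whitespace: goes to pend (only if cur nonempty)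
        have hstep : pvStepB (out, cur, pend) c
            = (out, cur, if cur ≠ [] then pend ++ [c] else pend) := by
          simp [pvStepB, hc, hsp_c]
        by_cases hcur : cur = []
        · rw [List.foldl_cons, hstep]
          simp only [hcur, ne_eq, not_true_eq_false, if_false]
          rw [ih out [] pend hpend (fun _ => hcp hcur) (fun h => absurd rfl h), hsp, hsplit']
          simp only [List.headI, List.tail]
          simp [pvTok, pv_strip_cons_space c t hsp_c]
        · rw [List.foldl_cons, hstep]
          simp only [hcur, ne_eq, not_false_eq_true, if_true]
          rw [ih out cur (pend ++ [c])
            (by simp [List.all_eq_true] at hpend ⊢; exact ⟨hpend, hsp_c⟩)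
            (fun h => absurd h hcur) hlast, hsp, hsplit']
          simp only [List.headI, List.tail]
          rw [pvTok, pvTok]
          simp only [hcur, ite_false]
          rw [show pend ++ c :: t = (pend ++ [c]) ++ t by simp]
      · -- ordinary char: commit pend and c
        have hstep : pvStepB (out, cur, pend) c = (out, cur ++ pend ++ [c], []) := by
          simp [pvStepB, hc, hsp_c]
        have hlast' : ∀ h : (cur ++ pend ++ [c]) ≠ [],
            PySem.Chars.isspace ((cur ++ pend ++ [c]).getLast h) = false := by
          intro h
          rw [List.getLast_concat]
          simpa using hsp_c
        rw [List.foldl_cons, hstep,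
          ih out (cur ++ pend ++ [c]) [] (by simp) (by simp) hlast', hsp, hsplit']
        simp only [List.headI, List.tail]
        by_cases hcur : cur = []
        · have hpnil : pend = [] := hcp hcur
          rw [hcur, hpnil]
          simp only [List.nil_append, List.append_nil]
          rw [pvTok, pvTok]
          simp only [List.cons_ne_nil, reduceIte, ite_false]
          rw [pv_strip_cons_nonspace c t (by simpa using hsp_c)]
          simp
        · have h2 : PySem.Chars.rstrip ((pend ++ [c]) ++ t)
              = (pend ++ [c]) ++ PySem.Chars.rstrip t := by
            apply pv_rstrip_append (pend ++ [c]) t (by simp)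
            rw [List.getLast_concat]
            simpa using hsp_c
          rw [pvTok, pvTok]
          simp only [hcur, List.append_eq_nil_iff, List.cons_ne_nil, and_false, false_and,
            ite_false, List.nil_append]
          rw [show pend ++ c :: t = (pend ++ [c]) ++ t by simp, h2]
          simp [List.append_assoc]

-- ===== VERDICT (by name: the statement is the Claim_ definition above) =====
theorem normalize_email_list_py_spec : Claim_equal_normalize_email_list_py := by
  intro x _
  unfold Spec_normalize_email_list_py
  match x with
  | none => rfl
  | some s =>
    by_cases hs : s = ""
    · simp [normalize_email_list_py, normalize_email_list_py_alt, hs]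
    · rw [pv_A_char s hs]
      have halt : normalize_email_list_py_alt (some s)
          = pvFin (s.toList.foldl pvStepB ([], [], [])) := by
        simp only [normalize_email_list_py_alt, pvFin]
        rw [if_neg hs]
      rw [halt, pv_B_main s.toList [] [] [] (by simp) (fun _ => rfl) (fun h => absurd rfl h)]
      rcases hsp : pvSplitC s.toList with _ | ⟨t, ts⟩
      · exact absurd hsp (pvSplitC_ne_nil s.toList)
      · simp only [List.headI, List.tail, pvTok, List.nil_append, List.map_cons, List.filter_cons]
        by_cases ht : PySem.Chars.strip t = [] <;> simp [ht]
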